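-- pv_equiv track=rewrite | github.com/Grumpy-Mike/Mikes-Pi-Bakery | The_Light_Matrix/Matrix_test.py | fullBin
-- ===== SOURCE A (Python) =====
-- def fullBin(num): # to show all leading zeros
--     binary = ""
--     for i in range(15,-1,-1):
--       if num & (1 << i):
--          binary = binary +"1"
--       else:
--          binary = binary +"0"
--     return binary
-- ===== SOURCE B (Python) =====
-- def fullBin(num): # to show all leading zeros
--     # Builds the 16 digits back-to-front: consumes the number LSB-first by
--     # shifting, then reverses — no per-position mask tests.
--     digits = []
--     n = num
--     for _ in range(16):
--         digits.append("1" if n & 1 else "0")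
--         n >>= 1
--     return "".join(reversed(digits))
-- ===== Notes on version B (the rewrite author's own statement) =====
-- stated objective: alternative
-- what changed: Instead of testing num against a fresh power-of-two mask for each position MSB-first, B consumes the number itself LSB-first (mask off the low bit, then shift right), collecting digits back-to-front and reversing once at the end.
import Mathlib
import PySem

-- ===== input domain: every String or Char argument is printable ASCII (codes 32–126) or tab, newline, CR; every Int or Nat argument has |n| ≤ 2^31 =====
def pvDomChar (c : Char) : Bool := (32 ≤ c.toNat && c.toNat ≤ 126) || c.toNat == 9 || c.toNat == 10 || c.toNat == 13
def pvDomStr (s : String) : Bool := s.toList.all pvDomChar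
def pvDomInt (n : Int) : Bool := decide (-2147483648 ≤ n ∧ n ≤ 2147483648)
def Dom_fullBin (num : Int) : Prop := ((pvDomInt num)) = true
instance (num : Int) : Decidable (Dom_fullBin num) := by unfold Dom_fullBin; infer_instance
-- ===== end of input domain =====

-- B builds the 16 digits back-to-front, consuming the number LSB-first by shifting (n & 1, n >>= 1)
-- and reversing once, instead of A's MSB-first mask tests num & (1 << i); alternative decomposition, same cost.


-- ===== PORT A =====
-- i runs 15..0, so i ≥ 0 and 'i.toNat' is exact for Python's '1 << i'
def fullBin (num : Int) : String :=
  String.mk ((PySem.List.pyRange 15 (-1) (-1)).foldl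
    (fun binary i => binary ++ [if PySem.Int.band num ((1:Int) <<< i.toNat) ≠ 0 then '1' else '0']) [])

-- ===== PORT B =====
def fullBin_alt (num : Int) : String :=
  let st := (PySem.List.pyRange 0 16 1).foldl
    (fun (st : List Char × Int) _ =>
      (st.1 ++ [if PySem.Int.band st.2 1 ≠ 0 then '1' else '0'], st.2 >>> 1))
    ([], num)
  String.mk st.1.reverse

-- ===== PRECONDITION & SPEC =====
def Spec_fullBin (num : Int) (out : String) : Prop := out = fullBin_alt num
instance (num : Int) (out : String) : Decidable (Spec_fullBin num out) := by unfold Spec_fullBin; infer_instance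

-- ===== CLAIM (what is proved, stated in full; the proofs are below) =====
def Claim_equal_fullBin : Prop := ∀ (num : Int), Dom_fullBin num → Spec_fullBin num (fullBin num)

-- ===== LEMMAS AND PROOFS =====

-- the character A emits for bit position i
def pvBitc (n : Int) (i : Nat) : Char :=
  if PySem.Int.band n ((1:Int) <<< i) ≠ 0 then '1' else '0'

-- band of a negative int with a power of two, in Nat terms
theorem pvBand_negSucc (n : Nat) (k : Nat) :
    PySem.Int.band (Int.negSucc n) ((1:Int) <<< k) =
      ((2 ^ k - 2 ^ k * (n.testBit k).toNat : Nat) : Int) := by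
  have e : ((1:Int) <<< k) = ((1 <<< k : Nat) : Int) := rfl
  have h0 : ¬ (0:Int) ≤ Int.negSucc n := by omega
  have h1 : (0:Int) ≤ ((1 <<< k : Nat) : Int) := by positivity
  rw [e]
  simp only [PySem.Int.band, if_neg h0, if_pos h1]
  have e2 : ((1 <<< k : Nat) : Int).toNat = 2 ^ k := by
    rw [Int.toNat_natCast, Nat.one_shiftLeft]
  have e3 : (-(Int.negSucc n) - 1).toNat = n := by omega
  rw [e2, e3, Nat.two_pow_and]

-- B's digit list (LSB first), as a recursion on the remaining count
def pvG (n : Int) : Nat → List Char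
  | 0 => []
  | k+1 => pvBitc n 0 :: pvG (n >>> 1) k

theorem pvBit_iff (num : Int) (i : Nat) :
    (PySem.Int.band num ((1:Int) <<< (i+1)) ≠ 0) ↔ (PySem.Int.band (num >>> 1) ((1:Int) <<< i) ≠ 0) := by
  cases num with
  | ofNat n =>
    have e1 : ((1:Int) <<< (i+1)) = ((1 <<< (i+1) : Nat) : Int) := rfl
    have e2 : ((1:Int) <<< i) = ((1 <<< i : Nat) : Int) := rfl
    have e3 : (Int.ofNat n) >>> 1 = ((n >>> 1 : Nat) : Int) := rfl
    rw [e1, e2, e3, Int.ofNat_eq_natCast, PySem.Int.band_natCast, PySem.Int.band_natCast]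
    have ht : (n >>> 1).testBit i = n.testBit (i + 1) := by
      rw [Nat.testBit_shiftRight, Nat.add_comm]
    simp [Nat.one_shiftLeft, Nat.and_two_pow, ht]
  | negSucc n =>
    have e3 : (Int.negSucc n) >>> 1 = Int.negSucc (n >>> 1) := rfl
    rw [e3, pvBand_negSucc, pvBand_negSucc]
    have ht : (n >>> 1).testBit i = n.testBit (i + 1) := by
      rw [Nat.testBit_shiftRight, Nat.add_comm]
    rw [ht]
    rcases Bool.eq_false_or_eq_true (n.testBit (i+1)) with h | h <;>
      simp [h]

theorem pvBitc_succ (num : Int) (i : Nat) : pvBitc num (i+1) = pvBitc (num >>> 1) i := by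
  unfold pvBitc
  by_cases h : PySem.Int.band num ((1:Int) <<< (i+1)) ≠ 0
  · rw [if_pos h, if_pos ((pvBit_iff num i).mp h)]
  · rw [if_neg h, if_neg (fun hc => h ((pvBit_iff num i).mpr hc))]

theorem pvG_eq_map (k : Nat) : ∀ (n : Int), pvG n k = (List.range k).map (pvBitc n) := by
  induction k with
  | zero => intro n; rfl
  | succ k ih =>
    intro n
    rw [List.range_succ_eq_map]
    simp only [pvG, ih, List.map_cons, List.map_map]
    refine congrArg₂ _ rfl ?_
    apply List.map_congr_left
    intro i _
    simp [Function.comp, pvBitc_succ]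

theorem pvFoldB_eq (l : List Int) : ∀ (acc : List Char) (n : Int),
    (l.foldl (fun (st : List Char × Int) _ =>
      (st.1 ++ [if PySem.Int.band st.2 1 ≠ 0 then '1' else '0'], st.2 >>> 1)) (acc, n)).1
    = acc ++ pvG n l.length := by
  induction l with
  | nil => intro acc n; simp [pvG]
  | cons x xs ih =>
    intro acc n
    simp only [List.foldl_cons, List.length_cons, ih, pvG, List.append_assoc]
    rfl

-- ===== VERDICT (by name: the statement is the Claim_ definition above) =====
theorem fullBin_spec : Claim_equal_fullBin := by
  intro num _
  unfold Spec_fullBin fullBin fullBin_alt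
  have hB := pvFoldB_eq (PySem.List.pyRange 0 16 1) [] num
  have hlen : (PySem.List.pyRange 0 16 1).length = 16 := by decide
  rw [hlen] at hB
  simp only [hB, List.nil_append]
  have hA : PySem.List.pyRange 15 (-1) (-1) = [15,14,13,12,11,10,9,8,7,6,5,4,3,2,1,0] := by decide
  rw [hA, PySem.List.foldl_append_singleton_eq_map, pvG_eq_map]
  simp only [List.range_succ, List.map_append, List.map_cons, List.map_nil,
    List.reverse_append, List.reverse_cons, List.reverse_nil]
  norm_num [pvBitc]
  rfl
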